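-- pv_equiv track=rewrite | github.com/morrisraybrooks/PalletManager | Desktop/work/PalletManager-main/generate_warehouse_map.py | find_breezeways
-- ===== SOURCE A (Python) =====
-- def find_breezeways(station_data):
--     """Identify breezeway locations in each aisle"""
--     breezeways = {}
--
--     for aisle in station_data:
--         stations = sorted(station_data[aisle].keys())
--         gaps = []
--
--         for i in range(len(stations) - 1):
--             if stations[i+1] - stations[i] > 1:
--                 gap_start = stations[i] + 1
--                 gap_end = stations[i+1] - 1
--                 gaps.append((gap_start, gap_end))
--
--         if gaps:
--             breezeways[aisle] = gaps[0]  # Take the first (main) breezeway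
--
--     return breezeways
-- ===== SOURCE B (Python) =====
-- def find_breezeways(station_data):
--     """Identify breezeway locations in each aisle (set-membership formulation)."""
--     breezeways = {}
--     for aisle, stations in station_data.items():
--         present = set(stations.keys())
--         if not present:
--             continue
--         mx = max(present)
--         starts = [k + 1 for k in present if k < mx and (k + 1) not in present]
--         if not starts:
--             continue
--         g = min(starts)
--         e = min(k for k in present if k > g)
--         breezeways[aisle] = (g, e - 1)
--     return breezeways
-- ===== Notes on version B (the rewrite author's own statement) =====
-- stated objective: alternative
-- what changed: Replaces A's sort-then-scan-adjacent-pairs with a set-membership formulation: the first gap start is the minimum of {k+1 : k in keys, k < max(keys), k+1 not in keys} and the gap end is the smallest key above it minus one, so no sorting and no neighbour scan.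
import Mathlib
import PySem

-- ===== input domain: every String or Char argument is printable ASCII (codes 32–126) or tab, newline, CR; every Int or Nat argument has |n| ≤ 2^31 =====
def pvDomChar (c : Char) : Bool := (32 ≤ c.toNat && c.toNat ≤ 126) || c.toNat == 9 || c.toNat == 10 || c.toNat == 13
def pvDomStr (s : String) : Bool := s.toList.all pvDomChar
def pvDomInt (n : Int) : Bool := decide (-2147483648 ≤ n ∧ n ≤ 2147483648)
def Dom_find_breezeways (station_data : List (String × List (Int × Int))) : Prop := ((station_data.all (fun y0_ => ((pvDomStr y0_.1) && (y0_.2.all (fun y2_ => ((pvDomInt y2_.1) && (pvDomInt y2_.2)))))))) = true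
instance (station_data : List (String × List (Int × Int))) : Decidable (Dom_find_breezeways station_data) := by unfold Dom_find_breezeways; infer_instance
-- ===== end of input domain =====

-- Both ports agree on the RETURN value; B replaces A's sort + adjacent-pair scan by a
-- set-membership formulation (min gap start / min key above it), no sorting.

-- ===== PORT A =====
-- literal transliteration of A: sort the distinct station keys, scan adjacent pairs by
-- index collecting all gaps, keep the first gap per aisle.
def find_breezeways (station_data : List (String × List (Int × Int))) : List (String × Int × Int) :=
  let d := PySem.Dict.ofList station_data
  (d.keys.foldl (fun bz aisle =>
      let stations := PySem.List.sorted (PySem.List.dedup ((d.getD aisle []).map (·.1))) (fun x => x) false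
      let gaps := (PySem.List.pyRange 0 (PySem.List.len stations - 1) 1).foldl
        (fun gaps i =>
          if PySem.List.pyGetD stations (i + 1) 0 - PySem.List.pyGetD stations i 0 > 1 then
            gaps ++ [(PySem.List.pyGetD stations i 0 + 1, PySem.List.pyGetD stations (i + 1) 0 - 1)]
          else gaps) []
      match gaps with
      | [] => bz
      | g :: _ => bz.insert aisle g) PySem.Dict.empty).items

-- ===== PORT B =====
-- transliteration of B (Source B): membership set of keys; first gap start = min of
-- {k+1 : k ∈ present, k < max, k+1 ∉ present}; gap end = min key above it, minus one.
def find_breezeways_alt (station_data : List (String × List (Int × Int))) : List (String × Int × Int) :=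
  let d := PySem.Dict.ofList station_data
  (d.items.foldl (fun bz p =>
      let present : PySem.Set Int := PySem.Set.ofList (p.2.map (·.1))
      match PySem.List.max? present (fun x => x) with
      | none => bz                      -- 'if not present: continue' (max of empty)
      | some mx =>
        let starts := (present.filter (fun k => decide (k < mx) && !(PySem.Set.contains present (k + 1)))).map (· + 1)
        match PySem.List.min? starts (fun x => x) with
        | none => bz                    -- 'if not starts: continue'
        | some g =>
          match PySem.List.min? (present.filter (fun k => decide (g < k))) (fun x => x) with
          | none => bz                  -- unreachable: some key above g exists
          | some e => bz.insert p.1 (g, e - 1)) PySem.Dict.empty).items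

-- ===== PRECONDITION & SPEC =====
def Spec_find_breezeways (station_data : List (String × List (Int × Int))) (out : List (String × Int × Int)) : Prop := out = find_breezeways_alt station_data
instance (station_data : List (String × List (Int × Int))) (out : List (String × Int × Int)) : Decidable (Spec_find_breezeways station_data out) := by unfold Spec_find_breezeways; infer_instance

-- ===== CLAIM (what is proved, stated in full; the proofs are below) =====
def Claim_equal_find_breezeways : Prop := ∀ (station_data : List (String × List (Int × Int))), Dom_find_breezeways station_data → Spec_find_breezeways station_data (find_breezeways station_data)

-- ===== LEMMAS AND PROOFS =====

-- all gaps of a sorted list, in scan order (what A's loop accumulates)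
def allGaps : List Int → List (Int × Int)
  | [] => []
  | [_] => []
  | a :: b :: t => (if b - a > 1 then [(a + 1, b - 1)] else []) ++ allGaps (b :: t)

-- the first gap of a strictly increasing list, scanned left to right
def firstGap : List Int → Option (Int × Int)
  | [] => none
  | [_] => none
  | a :: b :: t => if b - a > 1 then some (a + 1, b - 1) else firstGap (b :: t)

theorem allGaps_head? (s : List Int) : (allGaps s).head? = firstGap s := by
  induction s with
  | nil => rfl
  | cons a t ih =>
    cases t with
    | nil => rfl
    | cons b t2 =>
      simp only [allGaps, firstGap]
      split_ifs <;> simp [ih]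

theorem pyGetD_cons_shift (a : Int) (l : List Int) (k : Nat) :
    PySem.List.pyGetD (a :: l) (1 + (k : Int)) 0 = PySem.List.pyGetD l (k : Int) 0 := by
  have h : (1 + (k : Int)) = ((k + 1 : Nat) : Int) := by push_cast; ring
  rw [h, PySem.List.pyGetD_natCast, PySem.List.pyGetD_natCast, List.getD_cons_succ]

-- A's index loop collects exactly allGaps of the sorted list
theorem loopA (s : List Int) (acc : List (Int × Int)) :
    (PySem.List.pyRange 0 (PySem.List.len s - 1) 1).foldl
      (fun gaps i =>
        if PySem.List.pyGetD s (i + 1) 0 - PySem.List.pyGetD s i 0 > 1 then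
          gaps ++ [(PySem.List.pyGetD s i 0 + 1, PySem.List.pyGetD s (i + 1) 0 - 1)]
        else gaps) acc = acc ++ allGaps s := by
  induction s generalizing acc with
  | nil => simp [PySem.List.len, PySem.List.pyRange_one_eq_nil, allGaps]
  | cons a t ih =>
    cases t with
    | nil => simp [PySem.List.len, PySem.List.pyRange_one_eq_nil, allGaps]
    | cons b t2 =>
      have hlen : PySem.List.len (a :: b :: t2) - 1 = (t2.length : Int) + 1 := by
        simp [PySem.List.len]
      rw [hlen, PySem.List.pyRange_one_cons (by positivity), List.foldl_cons]
      have hg0 : PySem.List.pyGetD (a :: b :: t2) (0 : Int) 0 = a := PySem.List.pyGetD_zero_cons _ _ _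
      have hg1 : PySem.List.pyGetD (a :: b :: t2) ((0 : Int) + 1) 0 = b := by
        rw [show ((0:Int)+1) = ((1:Nat):Int) by norm_num, PySem.List.pyGetD_natCast]; rfl
      rw [hg0, hg1, show (0:Int)+1 = 1 from by norm_num]
      set acc' := (if b - a > 1 then acc ++ [(a + 1, b - 1)] else acc) with hacc'
      have htail : (PySem.List.pyRange 1 ((t2.length : Int) + 1) 1).foldl
          (fun gaps i =>
            if PySem.List.pyGetD (a :: b :: t2) (i + 1) 0 - PySem.List.pyGetD (a :: b :: t2) i 0 > 1 then
              gaps ++ [(PySem.List.pyGetD (a :: b :: t2) i 0 + 1, PySem.List.pyGetD (a :: b :: t2) (i + 1) 0 - 1)]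
            else gaps) acc' = acc' ++ allGaps (b :: t2) := by
        have hr1 : PySem.List.pyRange 1 ((t2.length : Int) + 1) 1
            = (List.range t2.length).map (fun k : Nat => 1 + (k : Int)) := by
          rw [PySem.List.pyRange_one,
            show ((t2.length : Int) + 1 - 1).toNat = t2.length by omega]
        have hih := ih acc'
        have hr2 : PySem.List.pyRange 0 (PySem.List.len (b :: t2) - 1) 1
            = (List.range t2.length).map (fun k : Nat => 0 + (k : Int)) := by
          rw [show PySem.List.len (b :: t2) - 1 = (t2.length : Int) by simp [PySem.List.len],
            PySem.List.pyRange_one, show ((t2.length : Int) - 0).toNat = t2.length by omega]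
        rw [hr2, List.foldl_map] at hih
        rw [hr1, List.foldl_map]
        rw [← hih]
        have hfun : (fun (gaps : List (Int × Int)) (k : Nat) =>
            if PySem.List.pyGetD (a :: b :: t2) ((1 + (k:Int)) + 1) 0 - PySem.List.pyGetD (a :: b :: t2) (1 + (k:Int)) 0 > 1 then
              gaps ++ [(PySem.List.pyGetD (a :: b :: t2) (1 + (k:Int)) 0 + 1, PySem.List.pyGetD (a :: b :: t2) ((1 + (k:Int)) + 1) 0 - 1)]
            else gaps) = (fun (gaps : List (Int × Int)) (k : Nat) =>
            if PySem.List.pyGetD (b :: t2) ((0 + (k:Int)) + 1) 0 - PySem.List.pyGetD (b :: t2) (0 + (k:Int)) 0 > 1 then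
              gaps ++ [(PySem.List.pyGetD (b :: t2) (0 + (k:Int)) 0 + 1, PySem.List.pyGetD (b :: t2) ((0 + (k:Int)) + 1) 0 - 1)]
            else gaps) := by
          funext gaps k
          have e1 : PySem.List.pyGetD (a :: b :: t2) (1 + (k:Int)) 0 = PySem.List.pyGetD (b :: t2) ((0:Int) + (k:Int)) 0 := by
            rw [pyGetD_cons_shift]; norm_num
          have e2 : PySem.List.pyGetD (a :: b :: t2) ((1 + (k:Int)) + 1) 0
              = PySem.List.pyGetD (b :: t2) (((0:Int) + (k:Int)) + 1) 0 := by
            rw [show (1 + (k:Int)) + 1 = 1 + ((k+1 : Nat) : Int) by push_cast; ring,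
              show ((0:Int) + (k:Int)) + 1 = ((k+1 : Nat) : Int) by push_cast; ring,
              pyGetD_cons_shift]
          rw [e1, e2]
        rw [hfun]
      rw [htail, hacc']
      simp only [allGaps]
      split_ifs <;> simp

theorem firstGap_none_succ_mem {s : List Int} (hp : s.Pairwise (· < ·))
    (hfg : firstGap s = none) :
    ∀ k ∈ s, (∃ y ∈ s, k < y) → k + 1 ∈ s := by
  induction s with
  | nil => simp
  | cons a t ih =>
    cases t with
    | nil =>
      intro k hk ⟨y, hy, hky⟩
      simp at hk hy; omega
    | cons b t2 =>
      simp only [firstGap] at hfg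
      split at hfg
      · exact absurd hfg (by simp)
      · rename_i hab
        have hab' : b = a + 1 := by
          have := (List.pairwise_cons.mp hp).1 b (by simp); omega
        intro k hk ⟨y, hy, hky⟩
        rcases List.mem_cons.mp hk with rfl | hk2
        · simp [hab']
        · have hy2 : y ∈ b :: t2 := by
            rcases List.mem_cons.mp hy with rfl | h
            · have := (List.pairwise_cons.mp hp).1 k hk2; omega
            · exact h
          have := ih hp.of_cons hfg k hk2 ⟨y, hy2, hky⟩
          exact List.mem_cons_of_mem _ this

theorem firstGap_some_spec {s : List Int} {u v : Int} (hp : s.Pairwise (· < ·))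
    (hfg : firstGap s = some (u, v)) :
    (u - 1) ∈ s ∧ u ∉ s ∧ (v + 1) ∈ s ∧ u ≤ v ∧
      (∀ k ∈ s, k + 1 ∉ s → (∃ y ∈ s, k < y) → u ≤ k + 1) ∧
      (∀ k ∈ s, u < k → v + 1 ≤ k) := by
  induction s with
  | nil => simp [firstGap] at hfg
  | cons a t ih =>
    cases t with
    | nil => simp [firstGap] at hfg
    | cons b t2 =>
      have hlt : ∀ x ∈ b :: t2, a < x := (List.pairwise_cons.mp hp).1
      have hlt2 : ∀ x ∈ t2, b < x := (List.pairwise_cons.mp hp.of_cons).1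
      simp only [firstGap] at hfg
      split at hfg
      · rename_i hab
        obtain ⟨rfl, rfl⟩ : a + 1 = u ∧ b - 1 = v := by
          simpa [Prod.ext_iff] using hfg
        refine ⟨by simp, ?_, ?_, by omega, ?_, ?_⟩
        · intro hmem
          rcases List.mem_cons.mp hmem with h | h
          · omega
          · have := hlt _ h
            rcases List.mem_cons.mp h with rfl | h2
            · omega
            · have := hlt2 _ h2; omega
        · have : b - 1 + 1 = b := by omega
          rw [this]; simp
        · intro k hk _ _
          rcases List.mem_cons.mp hk with rfl | h
          · omega
          · have := hlt _ h; omega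
        · intro k hk hka
          rcases List.mem_cons.mp hk with rfl | h
          · omega
          · rcases List.mem_cons.mp h with rfl | h2
            · omega
            · have := hlt2 _ h2; omega
      · rename_i hab
        have hab' : b = a + 1 := by have := hlt b (by simp); omega
        obtain ⟨h1, h2, h3, h4, h5, h6⟩ := ih hp.of_cons hfg
        have hub : b ≤ u - 1 := by
          rcases List.mem_cons.mp h1 with rfl | h
          · omega
          · have := hlt2 _ h; omega
        refine ⟨List.mem_cons_of_mem _ h1, ?_, List.mem_cons_of_mem _ h3, h4, ?_, ?_⟩
        · intro hmem
          rcases List.mem_cons.mp hmem with rfl | h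
          · omega
          · exact h2 h
        · intro k hk hk1 ⟨y, hy, hky⟩
          rcases List.mem_cons.mp hk with rfl | hkt
          · exact absurd (by simp [hab']) hk1
          · have hy2 : y ∈ b :: t2 := by
              rcases List.mem_cons.mp hy with rfl | h
              · have := hlt k hkt; omega
              · exact h
            exact h5 k hkt (fun h => hk1 (List.mem_cons_of_mem _ h)) ⟨y, hy2, hky⟩
        · intro k hk hku
          rcases List.mem_cons.mp hk with rfl | h
          · omega
          · exact h6 k h hku

-- the min of a list of Ints is determined by its two defining properties
theorem min?_id_some {l : List Int} {m : Int} (hm : m ∈ l) (hmin : ∀ y ∈ l, m ≤ y) :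
    PySem.List.min? l (fun x => x) = some m := by
  cases h : PySem.List.min? l (fun x => x) with
  | none =>
    rw [PySem.List.min?_eq_none_iff] at h
    subst h; simp at hm
  | some m' =>
    have h1 := PySem.List.min?_mem h
    have h2 := PySem.List.min?_isMin h m hm
    have h3 := hmin m' h1
    simp only [Option.some.injEq]
    omega

theorem step_eq (bz : PySem.Dict String (Int × Int)) (aisle : String) (v : List (Int × Int)) :
    (let stations := PySem.List.sorted (PySem.List.dedup (v.map (·.1))) (fun x => x) false
     let gaps := (PySem.List.pyRange 0 (PySem.List.len stations - 1) 1).foldl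
        (fun gaps i =>
          if PySem.List.pyGetD stations (i + 1) 0 - PySem.List.pyGetD stations i 0 > 1 then
            gaps ++ [(PySem.List.pyGetD stations i 0 + 1, PySem.List.pyGetD stations (i + 1) 0 - 1)]
          else gaps) []
     match gaps with
     | [] => bz
     | g :: _ => bz.insert aisle g) =
    (let present : PySem.Set Int := PySem.Set.ofList (v.map (·.1))
     match PySem.List.max? present (fun x => x) with
     | none => bz
     | some mx =>
       let starts := (present.filter (fun k => decide (k < mx) && !(PySem.Set.contains present (k + 1)))).map (· + 1)
       match PySem.List.min? starts (fun x => x) with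
       | none => bz
       | some g =>
         match PySem.List.min? (present.filter (fun k => decide (g < k))) (fun x => x) with
         | none => bz
         | some e => bz.insert aisle (g, e - 1)) := by
  simp only [PySem.List.dedup_eq_ofList]
  have hpair := PySem.List.sorted_ofList_pairwise_lt (xs := v.map (·.1))
  set P : PySem.Set Int := PySem.Set.ofList (v.map (·.1)) with hP
  set s := PySem.List.sorted P (fun x => x) false with hs
  have hperm : s.Perm P := PySem.List.sorted_perm P (fun x => x) false
  have hmem : ∀ x : Int, x ∈ s ↔ x ∈ P := fun x => hperm.mem_iff
  rw [loopA s []]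
  simp only [List.nil_append]
  cases hfg : firstGap s with
  | none =>
    have hnil : allGaps s = [] := by
      have h := allGaps_head? s
      rw [hfg] at h
      exact List.head?_eq_none_iff.mp h
    rw [hnil]
    cases hmx : PySem.List.max? P (fun x => x) with
    | none => rfl
    | some mx =>
      dsimp only
      have hmxmem : mx ∈ P := PySem.List.max?_mem hmx
      have hfilter : P.filter (fun k => decide (k < mx) && !(PySem.Set.contains P (k + 1))) = [] := by
        rw [List.filter_eq_nil_iff]
        intro k hkP hq
        simp only [Bool.and_eq_true, decide_eq_true_eq, Bool.not_eq_true'] at hq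
        obtain ⟨hklt, hknot⟩ := hq
        have hknotP : k + 1 ∉ P := by
          intro hc
          rw [show (PySem.Set.contains P (k + 1)) = ((k+1) ∈ P : Bool) from by
            simp [PySem.Set.contains]] at hknot
          simp [hc] at hknot
        have := firstGap_none_succ_mem hpair hfg k ((hmem k).mpr hkP)
          ⟨mx, (hmem mx).mpr hmxmem, hklt⟩
        exact hknotP ((hmem (k + 1)).mp this)
      rw [hfilter]
      have hm0 : PySem.List.min? (List.map (fun x => x + 1) ([] : List Int)) (fun x => x) = none := rfl
      rw [hm0]
  | some uv =>
    obtain ⟨u, v⟩ := uv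
    obtain ⟨h1, h2, h3, h4, h5, h6⟩ := firstGap_some_spec hpair hfg
    have hAG : ∃ rest, allGaps s = (u, v) :: rest := by
      have h := allGaps_head? s
      rw [hfg] at h
      cases hag : allGaps s with
      | nil => rw [hag] at h; simp at h
      | cons g rest => rw [hag] at h; simp at h; exact ⟨rest, by rw [h]⟩
    obtain ⟨rest, hAG⟩ := hAG
    rw [hAG]
    have h1P : u - 1 ∈ P := (hmem _).mp h1
    have h3P : v + 1 ∈ P := (hmem _).mp h3
    cases hmx : PySem.List.max? P (fun x => x) with
    | none =>
      rw [PySem.List.max?_eq_none_iff] at hmx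
      rw [hmx] at h1P
      simp at h1P
    | some mx =>
      dsimp only
      have hmxmem : mx ∈ P := PySem.List.max?_mem hmx
      have hmxmax : ∀ y ∈ P, y ≤ mx := fun y hy => PySem.List.max?_isMax hmx y hy
      have hcont : ∀ x : Int, PySem.Set.contains P x = (decide (x ∈ P)) := by
        intro x; simp [PySem.Set.contains]
      have hstart : PySem.List.min?
          ((P.filter (fun k => decide (k < mx) && !(PySem.Set.contains P (k + 1)))).map (· + 1))
          (fun x => x) = some u := by
        apply min?_id_some
        · refine List.mem_map.mpr ⟨u - 1, List.mem_filter.mpr ⟨h1P, ?_⟩, by omega⟩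
          have hu1 : u - 1 < mx := by
            have := hmxmax _ h3P; omega
          have heq : u - 1 + 1 = u := by omega
          simp [heq, hu1]
          exact fun hc => h2 ((hmem u).mpr hc)
        · intro y hy
          obtain ⟨k, hkf, rfl⟩ := List.mem_map.mp hy
          obtain ⟨hkP, hq⟩ := List.mem_filter.mp hkf
          simp only [hcont, Bool.and_eq_true, decide_eq_true_eq, Bool.not_eq_true'] at hq
          obtain ⟨hklt, hknot⟩ := hq
          have hknotP : k + 1 ∉ P := by simpa using hknot
          exact h5 k ((hmem k).mpr hkP) (fun hc => hknotP ((hmem _).mp hc))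
            ⟨mx, (hmem mx).mpr hmxmem, hklt⟩
      rw [hstart]
      dsimp only
      have hend : PySem.List.min? (P.filter (fun k => decide (u < k))) (fun x => x)
          = some (v + 1) := by
        apply min?_id_some
        · exact List.mem_filter.mpr ⟨h3P, by simp; omega⟩
        · intro y hy
          obtain ⟨hyP, hyq⟩ := List.mem_filter.mp hy
          simp only [decide_eq_true_eq] at hyq
          exact h6 y ((hmem y).mpr hyP) hyq
      rw [hend]
      dsimp only
      have hv : v + 1 - 1 = v := by omega
      rw [hv]

theorem find_breezeways_spec : Claim_equal_find_breezeways := by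
  intro sd _
  unfold Spec_find_breezeways find_breezeways find_breezeways_alt
  dsimp only
  congr 1
  rw [PySem.Dict.items_eq_map_keys (PySem.Dict.ofList sd) (PySem.Dict.nodup_keys_ofList sd) [],
    List.foldl_map]
  congr 1
  funext bz aisle
  exact step_eq bz aisle ((PySem.Dict.ofList sd).getD aisle [])
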